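-- pv_equiv track=rewrite | github.com/theabbie/leetcode | miscellaneous/permutation_check.py | checktest
-- ===== SOURCE A (Python) =====
-- from collections import Counter
--
-- def checktest(arr):
--     ctr = Counter(arr)
--     M = max(ctr, key = lambda el: (ctr[el], el))
--     n = 0
--     for el in arr:
--         if el < M:
--             n += 1
--     return M >= n + ctr[M]
-- ===== SOURCE B (Python) =====
-- def checktest(arr):
--     s = sorted(arr)
--     best = s[0]
--     best_len = 0
--     cnt_le = 0
--     i = 0
--     n = len(s)
--     while i < n:
--         j = i + 1
--         while j < n and s[j] == s[i]:
--             j += 1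
--         if j - i >= best_len:
--             best, best_len, cnt_le = s[i], j - i, j
--         i = j
--     return best >= cnt_le
-- ===== Notes on version B (the rewrite author's own statement) =====
-- stated objective: alternative
-- what changed: Replaces A's Counter hash table + max over keys by (count, value) + a separate loop counting elements below the maximizer with sorting a copy and a single run-length scan over contiguous equal-value runs (ties broken toward the later, larger value), the end index of the winning run giving the element count.
import Mathlib
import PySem

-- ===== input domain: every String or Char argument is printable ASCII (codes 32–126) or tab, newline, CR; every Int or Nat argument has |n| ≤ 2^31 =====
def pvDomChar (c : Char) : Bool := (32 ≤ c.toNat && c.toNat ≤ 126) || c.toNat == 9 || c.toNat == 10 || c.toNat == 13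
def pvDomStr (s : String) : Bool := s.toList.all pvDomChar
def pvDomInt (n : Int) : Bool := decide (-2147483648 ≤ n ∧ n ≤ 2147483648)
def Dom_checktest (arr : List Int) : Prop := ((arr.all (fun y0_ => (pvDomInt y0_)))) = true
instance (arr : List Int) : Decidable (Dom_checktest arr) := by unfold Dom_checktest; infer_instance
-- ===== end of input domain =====

-- B replaces A's Counter + max-by-(count,value) + separate "< M" counting loop by
-- sorting a copy and one run-length scan over the sorted array.


-- ===== PORT A =====
-- Counter(arr); M = max key by (count, value); n = #elements < M; return M >= n + ctr[M].
def checktest (arr : List Int) : Bool :=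
  let ctr := PySem.Dict.counter arr
  match PySem.List.max2? ctr.keys (fun el => ctr.getD el 0) (fun el => el) with
  | none => false   -- Python: max() over the empty Counter raises ValueError; excluded by Pre_
  | some M =>
    let n : Int := arr.foldl (fun n el => if el < M then n + 1 else n) 0
    decide (M ≥ n + ctr.getD M 0)

-- ===== PORT B =====
-- _scan(rest, best, best_len, seen, cnt_le): consume one run of equal values at the head of
-- rest, update best/best_len/cnt_le when the run length is >= best_len, recurse on the rest.
def pvScan : List Int → Int → Nat → Nat → Nat → Int × Nat
  | [], best, _, _, cnt_le => (best, cnt_le)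
  | v :: t, best, best_len, seen, cnt_le =>
    let run := 1 + (t.takeWhile (fun x => x == v)).length
    let seen' := seen + run
    if run ≥ best_len then
      pvScan (t.dropWhile (fun x => x == v)) v run seen' seen'
    else
      pvScan (t.dropWhile (fun x => x == v)) best best_len seen' cnt_le
  termination_by rest _ _ _ _ => rest.length
  decreasing_by
    · exact Nat.lt_succ_of_le (List.length_dropWhile_le _ _)
    · exact Nat.lt_succ_of_le (List.length_dropWhile_le _ _)

def checktest_alt (arr : List Int) : Bool :=
  match PySem.List.sorted arr (fun x => x) false with
  | [] => false   -- Python: indexing the first element raises IndexError on the empty list; excluded by Pre_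
  | h :: t =>
    let r := pvScan (h :: t) h 0 0 0
    decide (r.1 ≥ (r.2 : Int))

-- ===== PRECONDITION & SPEC =====
-- A raises (ValueError from max of an empty Counter) exactly on the empty list; B's first-element access raises there too.
def Pre_checktest (arr : List Int) : Prop := arr ≠ []
instance (arr : List Int) : Decidable (Pre_checktest arr) := by unfold Pre_checktest; infer_instance
def pvWitness_checktest : List Int := ([1, 2, 2])

def Spec_checktest (arr : List Int) (out : Bool) : Prop := out = checktest_alt arr
instance (arr : List Int) (out : Bool) : Decidable (Spec_checktest arr out) := by unfold Spec_checktest; infer_instance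

-- ===== CLAIM (what is proved, stated in full; the proofs are below) =====
def Claim_equal_checktest : Prop := ∀ (arr : List Int), Dom_checktest arr → Pre_checktest arr → Spec_checktest arr (checktest arr)

-- ===== LEMMAS AND PROOFS =====

-- v is the maximizer of (multiplicity in l, value) in lexicographic order.
def IsLexMax (l : List Int) (v : Int) : Prop :=
  v ∈ l ∧ ∀ u ∈ l, l.count u < l.count v ∨ (l.count u = l.count v ∧ u ≤ v)

-- lexicographic ≤ on (k1 ·, k2 ·)
def pvLexLe (k1 k2 : Int → Int) (a b : Int) : Prop :=
  k1 a < k1 b ∨ (k1 a = k1 b ∧ k2 a ≤ k2 b)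

theorem pvLexLe_refl (k1 k2 : Int → Int) (a : Int) : pvLexLe k1 k2 a a :=
  Or.inr ⟨rfl, le_refl _⟩

theorem pvLexLe_trans {k1 k2 : Int → Int} {a b c : Int}
    (h1 : pvLexLe k1 k2 a b) (h2 : pvLexLe k1 k2 b c) : pvLexLe k1 k2 a c := by
  unfold pvLexLe at *; omega

-- the step function inside PySem.List.max2?
def pvStep (k1 k2 : Int → Int) : Option Int → Int → Option Int := fun acc x =>
  match acc with
  | none => some x
  | some m =>
    if (decide (k1 m < k1 x) || !decide (k1 x < k1 m) && decide (k2 m < k2 x)) = true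
    then some x else some m

theorem pvMax2_cons (a : Int) (ks : List Int) (k1 k2 : Int → Int) :
    PySem.List.max2? (a :: ks) k1 k2 = ks.foldl (pvStep k1 k2) (some a) := by
  unfold PySem.List.max2?
  rw [List.foldl_cons]
  show List.foldl _ (some a) ks = _
  refine List.foldl_ext _ _ _ ?_
  intro acc x _
  cases acc with
  | none => rfl
  | some m => rfl

theorem pvMax2Aux (k1 k2 : Int → Int) :
    ∀ (xs : List Int) (m0 : Int),
      ∃ m, xs.foldl (pvStep k1 k2) (some m0) = some m ∧ (m = m0 ∨ m ∈ xs) ∧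
        pvLexLe k1 k2 m0 m ∧ ∀ y ∈ xs, pvLexLe k1 k2 y m := by
  intro xs
  induction xs with
  | nil =>
    intro m0
    exact ⟨m0, rfl, Or.inl rfl, pvLexLe_refl _ _ _, by simp⟩
  | cons x xs ih =>
    intro m0
    rw [List.foldl_cons]
    by_cases hc : k1 m0 < k1 x ∨ (k1 m0 ≤ k1 x ∧ k2 m0 < k2 x)
    · have hstep : pvStep k1 k2 (some m0) x = some x := by
        simp only [pvStep]
        rw [if_pos]
        simp only [Bool.or_eq_true, Bool.and_eq_true, Bool.not_eq_true',
          decide_eq_true_eq, decide_eq_false_iff_not]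
        omega
      rw [hstep]
      obtain ⟨m, hm, hmem, hle, hall⟩ := ih x
      refine ⟨m, hm, ?_, ?_, ?_⟩
      · rcases hmem with rfl | hmem
        · exact Or.inr (by simp)
        · exact Or.inr (by simp [hmem])
      · refine pvLexLe_trans ?_ hle
        unfold pvLexLe; omega
      · intro y hy
        rcases List.mem_cons.mp hy with rfl | hy
        · exact hle
        · exact hall y hy
    · have hstep : pvStep k1 k2 (some m0) x = some m0 := by
        simp only [pvStep]
        rw [if_neg]
        simp only [Bool.or_eq_true, Bool.and_eq_true, Bool.not_eq_true',
          decide_eq_true_eq, decide_eq_false_iff_not]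
        omega
      rw [hstep]
      obtain ⟨m, hm, hmem, hle, hall⟩ := ih m0
      refine ⟨m, hm, ?_, hle, ?_⟩
      · rcases hmem with rfl | hmem
        · exact Or.inl rfl
        · exact Or.inr (by simp [hmem])
      · intro y hy
        rcases List.mem_cons.mp hy with rfl | hy
        · refine pvLexLe_trans ?_ hle
          unfold pvLexLe
          simp only [not_or, not_and, not_lt] at hc
          omega
        · exact hall y hy

theorem max2?_counter_some {arr : List Int} (h : arr ≠ []) :
    ∃ M, PySem.List.max2? (PySem.Dict.counter arr).keys
          (fun el => (PySem.Dict.counter arr).getD el 0) (fun el => el) = some M := by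
  cases arr with
  | nil => exact absurd rfl h
  | cons w rest =>
    have hwk : w ∈ (PySem.Dict.counter (w :: rest)).keys := by
      rw [PySem.Dict.keys_counter]
      exact (PySem.Set.mem_ofList _ _).mpr (by simp)
    cases hk : (PySem.Dict.counter (w :: rest)).keys with
    | nil => rw [hk] at hwk; simp at hwk
    | cons a ks =>
      rw [pvMax2_cons]
      obtain ⟨m, hm, -, -, -⟩ := pvMax2Aux _ _ ks a
      exact ⟨m, hm⟩

theorem max2?_cons_isLexMax (arr : List Int) {M : Int}
    (h : PySem.List.max2? (PySem.Dict.counter arr).keys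
          (fun el => (PySem.Dict.counter arr).getD el 0) (fun el => el) = some M) :
    IsLexMax arr M := by
  cases arr with
  | nil =>
    exfalso
    have hk : (PySem.Dict.counter ([] : List Int)).keys = [] := rfl
    rw [hk] at h
    simp [PySem.List.max2?] at h
  | cons w rest =>
    cases hk : (PySem.Dict.counter (w :: rest)).keys with
    | nil =>
      exfalso
      have hwk : w ∈ (PySem.Dict.counter (w :: rest)).keys := by
        rw [PySem.Dict.keys_counter]
        exact (PySem.Set.mem_ofList _ _).mpr (by simp)
      rw [hk] at hwk; simp at hwk
    | cons a ks =>
      rw [hk, pvMax2_cons] at h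
      obtain ⟨m, hm, hmem, hle, hall⟩ := pvMax2Aux _ _ ks a
      rw [hm] at h
      have hMm : M = m := (Option.some.inj h).symm
      subst hMm
      have hkeys : ∀ u : Int, u ∈ w :: rest → u ∈ a :: ks := by
        intro u hu
        rw [← hk, PySem.Dict.keys_counter]
        exact (PySem.Set.mem_ofList _ _).mpr hu
      have hMk : M ∈ w :: rest := by
        have : M ∈ a :: ks := by
          rcases hmem with rfl | hmem
          · simp
          · simp [hmem]
        rw [← hk, PySem.Dict.keys_counter] at this
        exact (PySem.Set.mem_ofList _ _).mp this
      refine ⟨hMk, ?_⟩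
      intro u hu
      have hlex : pvLexLe (fun el => (PySem.Dict.counter (w :: rest)).getD el 0)
          (fun el => el) u M := by
        rcases List.mem_cons.mp (hkeys u hu) with rfl | huk
        · exact hle
        · exact hall u huk
      unfold pvLexLe at hlex
      simp only [PySem.Dict.getD_counter] at hlex
      omega

theorem checktest_eq (arr : List Int) (M : Int)
    (h : PySem.List.max2? (PySem.Dict.counter arr).keys
          (fun el => (PySem.Dict.counter arr).getD el 0) (fun el => el) = some M) :
    checktest arr =
      decide (M ≥ ((arr.countP (fun el => decide (el < M)) : Int) + (arr.count M : Int))) := by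
  have hfun : (fun (n : Int) el => if el < M then n + 1 else n)
      = (fun (n : Int) el => if (fun el => decide (el < M)) el = true then n + 1 else n) := by
    funext n el
    by_cases hel : el < M <;> simp [hel]
  simp only [checktest]
  rw [h]
  simp only [hfun, PySem.List.foldl_count_if, PySem.Dict.getD_counter, zero_add]

-- ---- sorted-run facts ----
theorem sorted_dropWhile_gt {v : Int} {t : List Int}
    (hs : (v :: t).Pairwise (· ≤ ·)) :
    ∀ x ∈ t.dropWhile (fun x => x == v), v < x := by
  induction t with
  | nil => simp [List.dropWhile]
  | cons a t ih =>
    intro x hx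
    have hva : v ≤ a := (List.pairwise_cons.mp hs).1 a (by simp)
    have hat : (a :: t).Pairwise (· ≤ ·) := (List.pairwise_cons.mp hs).2
    by_cases ha : a = v
    · subst ha
      rw [List.dropWhile_cons] at hx
      simp only [BEq.rfl, if_pos] at hx
      have hvt : (a :: t).Pairwise (· ≤ ·) := hat
      exact ih hvt x hx
    · rw [List.dropWhile_cons] at hx
      have hbe : (a == v) = false := by simp [ha]
      rw [hbe] at hx
      simp only [Bool.false_eq_true, if_neg, not_false_iff] at hx
      have hvlta : v < a := lt_of_le_of_ne hva (fun e => ha e.symm)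
      rcases List.mem_cons.mp hx with rfl | hxt
      · exact hvlta
      · exact lt_of_lt_of_le hvlta ((List.pairwise_cons.mp hat).1 x hxt)

theorem count_head_run (v : Int) (t : List Int) :
    (v :: t).count v =
      (1 + (t.takeWhile (fun x => x == v)).length) + (t.dropWhile (fun x => x == v)).count v := by
  have ht : t.takeWhile (fun x => x == v) ++ t.dropWhile (fun x => x == v) = t :=
    List.takeWhile_append_dropWhile
  have h1 : (t.takeWhile (fun x => x == v)).count v
      = (t.takeWhile (fun x => x == v)).length := by
    rw [List.count_eq_length]
    intro b hb
    have hbv : b = v := by simpa using List.mem_takeWhile_imp hb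
    exact hbv.symm
  calc (v :: t).count v = t.count v + 1 := by simp
    _ = ((t.takeWhile (fun x => x == v)).count v
          + (t.dropWhile (fun x => x == v)).count v) + 1 := by rw [← List.count_append, ht]
    _ = _ := by rw [h1]; omega

theorem count_tail_run {v : Int} (u : Int) (t : List Int) (hu : u ≠ v) :
    (v :: t).count u = (t.dropWhile (fun x => x == v)).count u := by
  have ht : t.takeWhile (fun x => x == v) ++ t.dropWhile (fun x => x == v) = t :=
    List.takeWhile_append_dropWhile
  have h0 : (t.takeWhile (fun x => x == v)).count u = 0 := by
    rw [List.count_eq_zero]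
    intro hmem
    exact hu (by simpa using List.mem_takeWhile_imp hmem)
  have hcv : (v == u) = false := beq_eq_false_iff_ne.mpr (Ne.symm hu)
  calc (v :: t).count u = t.count u := by rw [List.count_cons, hcv]; simp
    _ = (t.takeWhile (fun x => x == v)).count u + (t.dropWhile (fun x => x == v)).count u := by
          rw [← List.count_append, ht]
    _ = _ := by rw [h0]; omega

theorem countP_le_run {v : Int} (w : Int) (t : List Int) (hvw : v ≤ w) :
    (v :: t).countP (fun x => decide (x ≤ w)) =
      (1 + (t.takeWhile (fun x => x == v)).length)
        + (t.dropWhile (fun x => x == v)).countP (fun x => decide (x ≤ w)) := by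
  have ht : t.takeWhile (fun x => x == v) ++ t.dropWhile (fun x => x == v) = t :=
    List.takeWhile_append_dropWhile
  have h1 : (t.takeWhile (fun x => x == v)).countP (fun x => decide (x ≤ w))
      = (t.takeWhile (fun x => x == v)).length := by
    apply List.countP_eq_length.mpr
    intro b hb
    have hb' : b = v := by simpa using List.mem_takeWhile_imp hb
    simp [hb', hvw]
  calc (v :: t).countP (fun x => decide (x ≤ w))
      = t.countP (fun x => decide (x ≤ w)) + 1 := by simp [hvw]
    _ = ((t.takeWhile (fun x => x == v)).countP (fun x => decide (x ≤ w))
          + (t.dropWhile (fun x => x == v)).countP (fun x => decide (x ≤ w))) + 1 := by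
          rw [← List.countP_append, ht]
    _ = _ := by rw [h1]; omega

theorem scan_none_aux :
    ∀ (n : Nat) (R : List Int), R.length ≤ n → R.Pairwise (· ≤ ·) →
      ∀ (bl : Nat), (∀ u ∈ R, R.count u < bl) →
      ∀ (best : Int) (seen cnt : Nat), pvScan R best bl seen cnt = (best, cnt) := by
  intro n
  induction n with
  | zero =>
    intro R hR _ bl _ best seen cnt
    have : R = [] := List.eq_nil_of_length_eq_zero (Nat.le_zero.mp hR)
    subst this
    rw [pvScan]
  | succ n ih =>
    intro R hR hs bl hb best seen cnt
    cases R with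
    | nil => rw [pvScan]
    | cons v t =>
      rw [pvScan]
      have hrun : (v :: t).count v
          = (1 + (t.takeWhile (fun x => x == v)).length)
            + (t.dropWhile (fun x => x == v)).count v := count_head_run v t
      have hvbl : (v :: t).count v < bl := hb v (by simp)
      have hif : ¬ (1 + (t.takeWhile (fun x => x == v)).length ≥ bl) := by omega
      rw [if_neg hif]
      apply ih
      · have h1 := List.length_dropWhile_le (fun x => x == v) t
        have h2 : (v :: t).length ≤ n + 1 := hR
        simp only [List.length_cons] at h2
        omega
      · exact List.Pairwise.sublist ((List.dropWhile_sublist _).cons v) hs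
      · intro u hu
        have hgt : v < u := sorted_dropWhile_gt hs u hu
        have hcount := count_tail_run u t (ne_of_gt hgt)
        rw [← hcount]
        exact hb u (List.mem_cons_of_mem _ ((List.dropWhile_sublist _).subset hu))

theorem scan_max_aux :
    ∀ (n : Nat) (R : List Int), R.length ≤ n → R.Pairwise (· ≤ ·) →
      ∀ (v : Int), IsLexMax R v → ∀ (bl : Nat), bl ≤ R.count v →
      ∀ (best : Int) (seen cnt : Nat),
        pvScan R best bl seen cnt = (v, seen + R.countP (fun x => decide (x ≤ v))) := by
  intro n
  induction n with
  | zero =>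
    intro R hR _ v hm _ _ _ _ _
    have : R = [] := List.eq_nil_of_length_eq_zero (Nat.le_zero.mp hR)
    subst this
    exact absurd hm.1 (by simp)
  | succ n ih =>
    intro R hR hs v hm bl hb best seen cnt
    cases R with
    | nil => exact absurd hm.1 (by simp)
    | cons v0 t =>
      have hlen : (t.dropWhile (fun x => x == v0)).length ≤ n := by
        have h1 := List.length_dropWhile_le (fun x => x == v0) t
        have h2 : (v0 :: t).length ≤ n + 1 := hR
        simp only [List.length_cons] at h2
        omega
      have hs2 : (t.dropWhile (fun x => x == v0)).Pairwise (· ≤ ·) :=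
        List.Pairwise.sublist ((List.dropWhile_sublist _).cons v0) hs
      have hgt : ∀ x ∈ t.dropWhile (fun x => x == v0), v0 < x := sorted_dropWhile_gt hs
      have hrun : (v0 :: t).count v0
          = (1 + (t.takeWhile (fun x => x == v0)).length)
            + (t.dropWhile (fun x => x == v0)).count v0 := count_head_run v0 t
      have hd0 : (t.dropWhile (fun x => x == v0)).count v0 = 0 := by
        rw [List.count_eq_zero]
        intro hmem
        exact lt_irrefl v0 (hgt v0 hmem)
      rw [pvScan]
      by_cases hv : v = v0
      · subst hv
        have hif : 1 + (t.takeWhile (fun x => x == v)).length ≥ bl := by omega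
        rw [if_pos hif]
        have hnone : ∀ u ∈ t.dropWhile (fun x => x == v),
            (t.dropWhile (fun x => x == v)).count u
              < 1 + (t.takeWhile (fun x => x == v)).length := by
          intro u hu
          have hvu : v < u := hgt u hu
          have := hm.2 u (List.mem_cons_of_mem _ ((List.dropWhile_sublist _).subset hu))
          rcases this with hlt | ⟨_, hle⟩
          · rw [count_tail_run u t (ne_of_gt hvu)] at hlt
            omega
          · exact absurd hle (not_le.mpr hvu)
        rw [scan_none_aux n _ hlen hs2 _ hnone]
        have hP0 : (t.dropWhile (fun x => x == v)).countP (fun x => decide (x ≤ v)) = 0 := by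
          apply List.countP_eq_zero.mpr
          intro a ha
          simpa using not_le.mpr (hgt a ha)
        rw [countP_le_run v t le_rfl, hP0]
        rfl
      · have hvt2 : v ∈ t.dropWhile (fun x => x == v0) := by
          rcases List.mem_cons.mp hm.1 with rfl | hvt
          · exact absurd rfl hv
          · have ht : t.takeWhile (fun x => x == v0) ++ t.dropWhile (fun x => x == v0) = t :=
              List.takeWhile_append_dropWhile
            rw [← ht] at hvt
            rcases List.mem_append.mp hvt with h1 | h2
            · exact absurd (by simpa using List.mem_takeWhile_imp h1) hv
            · exact h2
        have hv0v : v0 < v := hgt v hvt2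
        have hcv : (v0 :: t).count v = (t.dropWhile (fun x => x == v0)).count v :=
          count_tail_run v t (ne_of_gt hv0v)
        have hm2 : IsLexMax (t.dropWhile (fun x => x == v0)) v := by
          refine ⟨hvt2, ?_⟩
          intro u hu
          have hvu : v0 < u := hgt u hu
          have := hm.2 u (List.mem_cons_of_mem _ ((List.dropWhile_sublist _).subset hu))
          rw [count_tail_run u t (ne_of_gt hvu), hcv] at this
          exact this
        have hcnt0 : (v0 :: t).count v0 ≤ (v0 :: t).count v := by
          rcases hm.2 v0 (by simp) with h | ⟨h, _⟩ <;> omega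
        have hrunle : 1 + (t.takeWhile (fun x => x == v0)).length
            ≤ (t.dropWhile (fun x => x == v0)).count v := by
          rw [← hcv]; omega
        have hrw := countP_le_run (t := t) v (le_of_lt hv0v)
        by_cases hif : 1 + (t.takeWhile (fun x => x == v0)).length ≥ bl
        · rw [if_pos hif, ih _ hlen hs2 v hm2 _ hrunle, hrw]
          exact congrArg (Prod.mk v) (by omega)
        · rw [if_neg hif, ih _ hlen hs2 v hm2 bl (hcv ▸ hb), hrw]
          exact congrArg (Prod.mk v) (by omega)

theorem scan_max (R : List Int) (v best : Int) (bl seen cnt : Nat)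
    (hs : R.Pairwise (· ≤ ·)) (hm : IsLexMax R v) (hb : bl ≤ R.count v) :
    pvScan R best bl seen cnt = (v, seen + R.countP (fun x => decide (x ≤ v))) :=
  scan_max_aux R.length R le_rfl hs v hm bl hb best seen cnt

theorem isLexMax_perm {l₁ l₂ : List Int} {v : Int} (hp : l₁.Perm l₂)
    (h : IsLexMax l₂ v) : IsLexMax l₁ v := by
  refine ⟨hp.mem_iff.mpr h.1, ?_⟩
  intro u hu
  rw [hp.count_eq, hp.count_eq]
  exact h.2 u (hp.subset hu)

theorem countP_le_split (l : List Int) (M : Int) :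
    l.countP (fun x => decide (x ≤ M)) = l.countP (fun x => decide (x < M)) + l.count M := by
  induction l with
  | nil => simp
  | cons b l ih =>
    simp only [List.countP_cons, List.count_cons]
    rcases lt_trichotomy b M with h | h | h
    · simp [h, le_of_lt h, ne_of_lt h, beq_iff_eq]
      omega
    · subst h
      simp
      omega
    · simp [not_le.mpr h, not_lt.mpr (le_of_lt h), (ne_of_gt h), beq_iff_eq]
      omega

theorem checktest_alt_eq (arr : List Int) (M : Int) (h : arr ≠ [])
    (hm : IsLexMax arr M) :
    checktest_alt arr = decide (M ≥ ((arr.countP (fun x => decide (x ≤ M)) : Int))) := by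
  have hs := PySem.List.sorted_pairwise arr (fun x => x)
  have hperm := PySem.List.sorted_perm arr (fun x => x) false
  have hne : PySem.List.sorted arr (fun x => x) false ≠ [] := fun h0 =>
    h ((PySem.List.sorted_eq_nil_iff _ _ _).mp h0)
  cases hseq : PySem.List.sorted arr (fun x => x) false with
  | nil => exact absurd hseq hne
  | cons hd tl =>
    rw [hseq] at hs hperm
    have hm2 : IsLexMax (hd :: tl) M := isLexMax_perm hperm hm
    simp only [checktest_alt]
    rw [hseq]
    simp only []
    rw [scan_max (hd :: tl) M hd 0 0 0 hs hm2 (Nat.zero_le _)]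
    simp [hperm.countP_eq]

-- ===== VERDICT (by name: the statement is the Claim_ definition above) =====
theorem checktest_spec : Claim_equal_checktest := by
  intro arr _ hpre
  unfold Spec_checktest
  obtain ⟨M, hM⟩ := max2?_counter_some hpre
  have hlex := max2?_cons_isLexMax arr hM
  rw [checktest_eq arr M hM, checktest_alt_eq arr M hpre hlex, countP_le_split]
  push_cast
  rfl
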